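-- pv_equiv track=rewrite | github.com/ravindra-isi/agentic-multigent-crew | agents_config.py | _run
-- ===== SOURCE A (Python) =====
-- def _run(document_content: str) -> str:
--     words = document_content.lower().split()
--     stop_words = {'the', 'and', 'or', 'but', 'in', 'on', 'at', 'to', 'for', 'of', 'with', 'by', 'a', 'an',
--                   'is', 'are', 'was', 'were', 'be', 'been', 'being', 'have', 'has', 'had', 'do', 'does',
--                   'did', 'will', 'would', 'could', 'should', 'may', 'might', 'must', 'can', 'this', 'that',
--                   'these', 'those'}
--     word_freq = {}
--     for word in words:
--         word = word.strip('.,!?;:"()[]{}')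
--         if word not in stop_words and len(word) > 3:
--             word_freq[word] = word_freq.get(word, 0) + 1
--     keywords = sorted(word_freq.items(), key=lambda x: x[1], reverse=True)[:10]
--     return str([word for word, freq in keywords])
-- ===== SOURCE B (Python) =====
-- def _run(document_content: str) -> str:
--     stop_words = set('the and or but in on at to for of with by a an is are was were be been being '
--                      'have has had do does did will would could should may might must can this that '
--                      'these those'.split())
--     words = [w.strip('.,!?;:"()[]{}') for w in document_content.lower().split()]
--     candidates = [w for w in words if w not in stop_words and len(w) > 3]
--     word_freq = {}
--     for w in candidates:
--         word_freq[w] = word_freq.get(w, 0) + 1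
--     if not word_freq:
--         return str([])
--     # stable bucket sort by count: buckets filled in dict insertion order keep
--     # first-occurrence order within equal counts, like Python's stable sorted()
--     top = max(word_freq.values())
--     buckets = {}
--     for word, count in word_freq.items():
--         buckets.setdefault(count, []).append(word)
--     result = []
--     for count in reversed(range(1, top + 1)):
--         result += buckets.get(count, [])
--     return str(result[:10])
-- ===== Notes on version B (the rewrite author's own statement) =====
-- stated objective: alternative
-- what changed: B replaces A's comparison sort of (word, count) pairs by a stable bucket sort: it groups words by count in dict insertion order and drains the buckets from the maximum count down, so ties keep first-occurrence order exactly like Python's stable sorted(); the filtering/counting is also split into two passes.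
import Mathlib
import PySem

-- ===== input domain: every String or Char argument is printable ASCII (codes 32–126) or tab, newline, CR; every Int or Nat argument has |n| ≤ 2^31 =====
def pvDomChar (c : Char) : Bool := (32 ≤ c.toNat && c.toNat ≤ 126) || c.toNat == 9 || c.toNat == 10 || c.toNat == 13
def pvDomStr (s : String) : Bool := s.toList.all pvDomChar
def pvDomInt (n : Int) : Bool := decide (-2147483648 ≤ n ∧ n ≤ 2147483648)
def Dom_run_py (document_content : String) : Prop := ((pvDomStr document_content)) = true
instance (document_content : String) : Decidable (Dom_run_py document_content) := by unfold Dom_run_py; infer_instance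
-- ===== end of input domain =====

-- B replaces A's comparison sort of (word, count) pairs by a stable bucket sort over counts
-- (buckets filled in dict insertion order, drained from the highest count down): objective 'alternative'.

-- ===== PORT A =====
-- shared literal data: the stop-word set and the characters stripped from each word
def pvStop : List String := ["the","and","or","but","in","on","at","to","for","of","with","by","a","an",
  "is","are","was","were","be","been","being","have","has","had","do","does",
  "did","will","would","could","should","may","might","must","can","this","that",
  "these","those"]
def pvStripSet : String := ".,!?;:\"()[]{}"
-- the filter `word not in stop_words and len(word) > 3` (identical line in A and B)
def pvKeep (w : String) : Bool := !(pvStop.contains w) && decide (3 < PySem.Str.len w)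
-- str(list_of_words): Python repr of each word (words are printable ASCII without whitespace,
-- so only the quote choice and the backslash/quote escapes of CPython's repr can occur), joined by ", "
def pvReprChars (cs : List Char) : List Char :=
  let q : Char := if cs.contains '\'' && !(cs.contains '"') then '"' else '\''
  q :: (cs.flatMap (fun c => if c = '\\' || c = q then ['\\', c] else [c]) ++ [q])
def pvStrList (ws : List String) : String :=
  String.ofList ('[' :: (List.intercalate [',', ' '] (ws.map (fun w => pvReprChars w.toList)) ++ [']']))

def run_py (document_content : String) : String :=
  let words := PySem.Str.split₀ (PySem.Str.lower document_content)
  let word_freq := words.foldl (fun d word =>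
      let w := PySem.Str.stripChars word pvStripSet
      if pvKeep w then d.insert w (d.getD w 0 + 1) else d) (PySem.Dict.empty : PySem.Dict String Int)
  -- sorted(word_freq.items(), key=lambda x: x[1], reverse=True)[:10] ([:10] = take 10)
  let keywords := (PySem.List.sorted word_freq.items (fun x => x.2) true).take 10
  pvStrList (keywords.map (fun x => x.1))

-- ===== PORT B =====
def pvStopText : String := "the and or but in on at to for of with by a an is are was were be been being have has had do does did will would could should may might must can this that these those"

def run_py_alt (document_content : String) : String :=
  let stop := PySem.Set.ofList (PySem.Str.split₀ pvStopText)
  let words := (PySem.Str.split₀ (PySem.Str.lower document_content)).map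
      (fun w => PySem.Str.stripChars w pvStripSet)
  let candidates := words.filter (fun w => !(PySem.Set.contains stop w) && decide (3 < PySem.Str.len w))
  let word_freq := candidates.foldl (fun d w => d.insert w (d.getD w 0 + 1)) (PySem.Dict.empty : PySem.Dict String Int)
  -- `if not word_freq: return str([])` and `top = max(word_freq.values())` as one match
  match PySem.List.max? word_freq.values (fun v => v) with
  | none => pvStrList []
  | some top =>
    -- buckets.setdefault(count, []).append(word)  ==  buckets[count] = buckets.get(count, []) + [word]
    let buckets := word_freq.items.foldl (fun d p => d.modify p.2 [] (fun l => l ++ [p.1])) PySem.Dict.empty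
    let result := (PySem.List.pyRange 1 (top + 1) 1).reverse.foldl (fun res c => res ++ buckets.getD c []) []
    pvStrList (result.take 10)

-- ===== PRECONDITION & SPEC =====
def Spec_run_py (document_content : String) (out : String) : Prop := out = run_py_alt document_content
instance (document_content : String) (out : String) : Decidable (Spec_run_py document_content out) := by unfold Spec_run_py; infer_instance

-- ===== CLAIM (what is proved, stated in full; the proofs are below) =====
def Claim_equal_run_py : Prop := ∀ (document_content : String), Dom_run_py document_content → Spec_run_py document_content (run_py document_content)

-- ===== LEMMAS AND PROOFS =====

theorem pv_insertBy_all {α : Type} (b : α → α → Bool) (x : α) (zs : List α)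
    (h : ∀ y ∈ zs, b x y = true) : PySem.List.insertBy b x zs = x :: zs := by
  cases zs with
  | nil => rfl
  | cons y ys => show (if b x y then _ else _) = _; rw [h y (by simp), if_pos rfl]

theorem pv_insertBy_prefix {α : Type} (b : α → α → Bool) (x : α) (ys zs : List α)
    (h : ∀ y ∈ ys, b x y = false) :
    PySem.List.insertBy b x (ys ++ zs) = ys ++ PySem.List.insertBy b x zs := by
  induction ys with
  | nil => rfl
  | cons y ys ih =>
    show (if b x y then _ else _) = _
    rw [h y (by simp), if_neg (by simp)]
    simp [ih (fun y hy => h y (by simp [hy]))]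

theorem pv_insertBy_buckets {α : Type} (key : α → Int) (x : α) :
    ∀ (cs : List Int) (f : Int → List α), cs.Pairwise (· > ·) → key x ∈ cs →
      (∀ c ∈ cs, ∀ y ∈ f c, key y = c) →
      PySem.List.insertBy (fun a b => decide (key b < key a)) x (cs.flatMap f)
        = cs.flatMap (fun c => f c ++ if key x = c then [x] else []) := by
  intro cs
  induction cs with
  | nil => intro f _ hk _; simp at hk
  | cons c cs ih =>
    intro f hp hk hf
    rw [List.flatMap_cons, List.flatMap_cons]
    by_cases hkc : key x = c
    · rw [pv_insertBy_prefix _ _ _ _ (fun y hy => by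
        have := hf c (by simp) y hy
        simp [this, hkc])]
      rw [pv_insertBy_all _ _ _ (fun y hy => by
        simp only [List.mem_flatMap] at hy
        obtain ⟨c', hc', hy⟩ := hy
        have hkey := hf c' (by simp [hc']) y hy
        have hgt : c > c' := (List.pairwise_cons.mp hp).1 c' hc'
        simp [hkey]; omega)]
      have hcongr : cs.flatMap (fun c' => f c' ++ if key x = c' then [x] else []) = cs.flatMap f := by
        apply List.flatMap_congr
        intro c' hc'
        have hgt : c > c' := (List.pairwise_cons.mp hp).1 c' hc'
        rw [if_neg (by omega), List.append_nil]
      rw [hcongr, if_pos hkc]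
      simp
    · have hk' : key x ∈ cs := by rcases List.mem_cons.mp hk with h | h; exact absurd h hkc; exact h
      rw [pv_insertBy_prefix _ _ _ _ (fun y hy => by
        have hkey := hf c (by simp) y hy
        have hgt : c > key x := (List.pairwise_cons.mp hp).1 _ hk'
        simp [hkey]; omega)]
      rw [ih f (List.pairwise_cons.mp hp).2 hk' (fun c' hc' => hf c' (by simp [hc'])), if_neg hkc]
      simp

theorem pv_bucketize {α : Type} (key : α → Int) :
    ∀ (xs : List α) (cs : List Int), cs.Pairwise (· > ·) → (∀ x ∈ xs, key x ∈ cs) →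
      PySem.List.sorted xs key true = cs.flatMap (fun c => xs.filter (fun x => key x == c)) := by
  intro xs
  induction xs using List.reverseRecOn with
  | nil => intro cs _ _; simp [PySem.List.sorted]
  | append_singleton xs x ih =>
    intro cs hp hmem
    rw [PySem.List.sorted_rev_eq_foldl_insertBy, List.foldl_append, List.foldl_cons, List.foldl_nil,
        ← PySem.List.sorted_rev_eq_foldl_insertBy, ih cs hp (fun y hy => hmem y (by simp [hy]))]
    rw [pv_insertBy_buckets key x cs _ hp (hmem x (by simp)) (fun c hc y hy => by
      simp only [List.mem_filter, beq_iff_eq] at hy; exact hy.2)]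
    apply Eq.symm
    apply List.flatMap_congr
    intro c hc
    by_cases h : key x = c
    · simp [List.filter_append, h]
    · simp [List.filter_append, h]

-- ===== VERDICT (by name: the statement is the Claim_ definition above) =====
theorem run_py_spec : Claim_equal_run_py := by
  unfold Claim_equal_run_py
  intro doc _
  unfold Spec_run_py
  simp only [run_py, run_py_alt]
  set words := PySem.Str.split₀ (PySem.Str.lower doc) with hwords
  set F := (words.map (fun w => PySem.Str.stripChars w pvStripSet)).filter pvKeep with hF
  -- A's counting loop and B's two loops build the same frequency dict: counter F
  have hA : words.foldl (fun d word =>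
      if pvKeep (PySem.Str.stripChars word pvStripSet) then
        d.insert (PySem.Str.stripChars word pvStripSet)
          (d.getD (PySem.Str.stripChars word pvStripSet) 0 + 1) else d)
      (PySem.Dict.empty : PySem.Dict String Int)
      = PySem.Dict.counter F := by
    rw [← List.foldl_map (f := fun w => PySem.Str.stripChars w pvStripSet)
        (g := fun d w => if pvKeep w then PySem.Dict.insert d w (d.getD w 0 + 1) else d),
        PySem.List.foldl_if_eq_foldl_filter, ← hF,
        PySem.Dict.foldl_insert_getD_add_one_eq_counter]
  have hstop : PySem.Set.ofList (PySem.Str.split₀ pvStopText) = pvStop := by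
    set_option maxRecDepth 4096 in decide
  have hcand : (words.map (fun w => PySem.Str.stripChars w pvStripSet)).filter
      (fun w => !(PySem.Set.contains (PySem.Set.ofList (PySem.Str.split₀ pvStopText)) w)
        && decide (3 < PySem.Str.len w)) = F := by
    rw [hstop, hF]
    apply List.filter_congr
    intro w _
    simp [pvKeep, PySem.Set.contains_eq_listContains]
  rw [hA, hcand, PySem.Dict.foldl_insert_getD_add_one_eq_counter]
  cases hm : PySem.List.max? (PySem.Dict.counter F).values (fun v => v) with
  | none =>
    rw [PySem.List.max?_eq_none_iff] at hm
    have hit : (PySem.Dict.counter F).items = [] := by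
      simpa [PySem.Dict.values] using hm
    rw [hit]
    simp [PySem.List.sorted]
  | some top =>
    simp only []
    have hitems := PySem.Dict.items_counter F
    set items := (PySem.Dict.counter F).items with hitemsdef
    have h1 : ∀ p ∈ items, 1 ≤ p.2 := by
      intro p hp
      rw [hitems] at hp
      simp only [List.mem_map] at hp
      obtain ⟨k, hk, rfl⟩ := hp
      have hkF : k ∈ F := (PySem.Set.mem_ofList (xs := F) (y := k)).mp hk
      have hc := List.count_pos_iff.mpr hkF
      simp only []
      omega
    have h2 : ∀ p ∈ items, p.2 ≤ top := by
      intro p hp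
      have hv : p.2 ∈ (PySem.Dict.counter F).values := by
        simp only [PySem.Dict.values, ← hitemsdef]
        exact List.mem_map_of_mem hp
      simpa using PySem.List.max?_isMax hm p.2 hv
    set cs := (PySem.List.pyRange 1 (top + 1) 1).reverse with hcs
    have hpair : cs.Pairwise (· > ·) := by
      rw [hcs, List.pairwise_reverse, PySem.List.pyRange_of_pos 1 (top + 1) (by norm_num),
        List.pairwise_map]
      exact (List.pairwise_lt_range).imp (by intro a b h; simp; omega)
    have hmemcs : ∀ p ∈ items, p.2 ∈ cs := by
      intro p hp
      rw [hcs, List.mem_reverse, PySem.List.mem_pyRange_iff_of_pos (by norm_num)]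
      exact ⟨h1 p hp, by have := h2 p hp; omega, one_dvd _⟩
    have hB : ∀ c : Int, (items.foldl (fun d p => d.modify p.2 [] (fun l => l ++ [p.1]))
        (PySem.Dict.empty : PySem.Dict Int (List String))).getD c []
        = (items.filter (fun p => p.2 == c)).map (fun p => p.1) := by
      intro c
      rw [← List.foldl_map (f := fun p : String × Int => (p.2, p.1))
          (g := fun (d : PySem.Dict Int (List String)) p => d.modify p.1 [] (fun l => l ++ [p.2])),
        PySem.Dict.getD_foldl_modify_append]
      simp [List.filter_map, List.map_map, Function.comp_def]
    rw [PySem.List.foldl_append_eq_flatMap, List.nil_append]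
    have hflat : cs.flatMap (fun c => (items.foldl (fun d p => d.modify p.2 [] (fun l => l ++ [p.1]))
        (PySem.Dict.empty : PySem.Dict Int (List String))).getD c [])
        = (cs.flatMap (fun c => items.filter (fun p => p.2 == c))).map (fun p => p.1) := by
      rw [List.map_flatMap]
      apply List.flatMap_congr
      intro c hc
      exact hB c
    rw [hflat, ← pv_bucketize (fun p : String × Int => p.2) items cs hpair hmemcs, List.map_take]
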